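-- pv_equiv track=rewrite | github.com/othmanegf/score-password | score mot de passe.py | LongMin
-- ===== SOURCE A (Python) =====
-- def LongMin(password):
--     max_length = 0
--     current_length = 0
--     for char in password:
--         if 'a' <= char <= 'z':
--             current_length += 1
--             max_length = max(max_length, current_length)
--         else:
--             current_length = 0
--     return max_length
-- ===== SOURCE B (Python) =====
-- def LongMin(password):
--     # Run-skipping scan: jump over each maximal lowercase run and take its length once.
--     chars = list(password)
--     n = len(chars)
--     best = 0
--     i = 0
--     while i < n:
--         if 'a' <= chars[i] <= 'z':
--             j = i
--             while j < n and 'a' <= chars[j] <= 'z':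
--                 j += 1
--             best = max(best, j - i)
--             i = j
--         else:
--             i += 1
--     return best
-- ===== Notes on version B (the rewrite author's own statement) =====
-- stated objective: alternative
-- what changed: B decomposes the string into maximal lowercase runs with an index-jumping inner scan and records each run's length once, instead of A's per-character current/max counter pair.
import Mathlib
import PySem

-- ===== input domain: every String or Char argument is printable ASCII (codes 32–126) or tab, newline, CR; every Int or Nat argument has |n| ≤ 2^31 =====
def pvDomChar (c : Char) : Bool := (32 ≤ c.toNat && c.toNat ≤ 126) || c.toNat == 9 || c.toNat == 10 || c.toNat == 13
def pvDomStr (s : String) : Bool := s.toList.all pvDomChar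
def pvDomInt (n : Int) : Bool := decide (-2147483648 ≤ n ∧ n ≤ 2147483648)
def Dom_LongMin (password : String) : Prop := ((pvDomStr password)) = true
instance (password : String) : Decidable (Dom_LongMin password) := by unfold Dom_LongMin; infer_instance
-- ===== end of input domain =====

-- B scans by maximal lowercase runs (index jumping) instead of A's per-character counter pair; same O(n) cost, different decomposition.

-- ===== PORT A =====
def LongMin (password : String) : Int :=
  (password.toList.foldl
    (fun (s : Int × Int) char =>
      if 'a' ≤ char ∧ char ≤ 'z' then (max s.1 (s.2 + 1), s.2 + 1)
      else (s.1, 0))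
    (0, 0)).1

-- ===== PORT B =====
-- termination facts for the run-skipping loop (cited in decreasing_by)
def pvInnerJ (chars : List Char) (j : Nat) : Nat :=
  if h : j < chars.length then
    if 'a' ≤ chars[j] ∧ chars[j] ≤ 'z' then pvInnerJ chars (j + 1) else j
  else j
termination_by chars.length - j

theorem pvInnerJ_ge (chars : List Char) (j : Nat) : j ≤ pvInnerJ chars j := by
  unfold pvInnerJ
  split
  · split
    · exact Nat.le_trans (Nat.le_succ j) (pvInnerJ_ge chars (j + 1))
    · exact Nat.le_refl j
  · exact Nat.le_refl j
termination_by chars.length - j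

theorem pvInnerJ_le (chars : List Char) (j : Nat) (hj : j ≤ chars.length) :
    pvInnerJ chars j ≤ chars.length := by
  unfold pvInnerJ
  split
  · split
    · exact pvInnerJ_le chars (j + 1) (by omega)
    · exact hj
  · exact hj
termination_by chars.length - j

theorem pvInnerJ_gt (chars : List Char) (i : Nat) (hi : i < chars.length)
    (hlow : 'a' ≤ chars[i] ∧ chars[i] ≤ 'z') : i < pvInnerJ chars i := by
  rw [pvInnerJ]
  simp only [hi, hlow, dif_pos]
  exact Nat.lt_of_lt_of_le (Nat.lt_succ_self i) (pvInnerJ_ge chars (i + 1))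

def pvLoop (chars : List Char) (best : Int) (i : Nat) : Int :=
  if h : i < chars.length then
    if hl : 'a' ≤ chars[i] ∧ chars[i] ≤ 'z' then
      let j := pvInnerJ chars i
      pvLoop chars (max best ((j : Int) - (i : Int))) j
    else pvLoop chars best (i + 1)
  else best
termination_by chars.length - i
decreasing_by
  · have h1 := pvInnerJ_gt chars i h hl
    have h2 := pvInnerJ_le chars i (Nat.le_of_lt h)
    omega
  · omega

def LongMin_alt (password : String) : Int := pvLoop password.toList 0 0

-- ===== PRECONDITION & SPEC =====
def Spec_LongMin (password : String) (out : Int) : Prop := out = LongMin_alt password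
instance (password : String) (out : Int) : Decidable (Spec_LongMin password out) := by unfold Spec_LongMin; infer_instance

-- ===== CLAIM (what is proved, stated in full; the proofs are below) =====
def Claim_equal_LongMin : Prop := ∀ (password : String), Dom_LongMin password → Spec_LongMin password (LongMin password)

-- ===== LEMMAS AND PROOFS =====

def pvLow (c : Char) : Bool := decide ('a' ≤ c ∧ c ≤ 'z')

/-- `pvG c l` = the max lowercase-run length in `l`, given a pending run of length `c` ending just before `l`
    (runs counted as A counts them, but without the accumulated max). -/
def pvG : Int → List Char → Int
  | _, [] => 0
  | c, x :: xs => if 'a' ≤ x ∧ x ≤ 'z' then max (c + 1) (pvG (c + 1) xs) else pvG 0 xs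

theorem pv_foldA (l : List Char) : ∀ (m c : Int), 0 ≤ m → 0 ≤ c →
    (l.foldl
      (fun (s : Int × Int) char =>
        if 'a' ≤ char ∧ char ≤ 'z' then (max s.1 (s.2 + 1), s.2 + 1)
        else (s.1, 0))
      (m, c)).1 = max m (pvG c l) := by
  induction l with
  | nil => intro m c hm _; simp [pvG]; omega
  | cons x xs ih =>
    intro m c hm hc
    by_cases h : 'a' ≤ x ∧ x ≤ 'z'
    · simp only [List.foldl_cons, pvG]
      rw [if_pos h, if_pos h]
      rw [ih (max m (c + 1)) (c + 1) (by omega) (by omega)]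
      rw [max_assoc]
    · simp only [List.foldl_cons, pvG]
      rw [if_neg h, if_neg h]
      exact ih m 0 hm le_rfl

theorem pvInnerJ_char (chars : List Char) (j : Nat) :
    pvInnerJ chars j = j + ((chars.drop j).takeWhile pvLow).length := by
  by_cases h : j < chars.length
  · rw [pvInnerJ, dif_pos h, List.drop_eq_getElem_cons h]
    by_cases hl : 'a' ≤ chars[j] ∧ chars[j] ≤ 'z'
    · have hlow : pvLow chars[j] = true := by simp [pvLow, hl]
      rw [if_pos hl, List.takeWhile_cons, hlow]
      simp only [if_pos, List.length_cons]
      rw [pvInnerJ_char chars (j + 1)]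
      omega
    · have hlow : pvLow chars[j] = false := by
        simp only [pvLow, decide_eq_false_iff_not]; exact hl
      rw [if_neg hl, List.takeWhile_cons, hlow]
      simp
  · rw [pvInnerJ, dif_neg h, List.drop_eq_nil_of_le (by omega)]
    simp
termination_by chars.length - j

theorem pvG_run (xs : List Char) : ∀ (x : Char) (c : Int), 0 ≤ c → pvLow x = true →
    pvG c (x :: xs) =
      max (c + 1 + ((xs.takeWhile pvLow).length : Int)) (pvG 0 (xs.drop (xs.takeWhile pvLow).length)) := by
  induction xs with
  | nil =>
    intro x c _ hx
    have hx' : 'a' ≤ x ∧ x ≤ 'z' := by simpa [pvLow] using hx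
    simp [pvG, hx']
  | cons y ys ih =>
    intro x c hc hx
    have hx' : 'a' ≤ x ∧ x ≤ 'z' := by simpa [pvLow] using hx
    by_cases hy : pvLow y = true
    · have hy' : 'a' ≤ y ∧ y ≤ 'z' := by simpa [pvLow] using hy
      have hih := ih y (c + 1) (by omega) hy
      simp only [pvG] at hih ⊢
      rw [if_pos hy'] at hih
      rw [if_pos hx', if_pos hy', hih]
      rw [List.takeWhile_cons, hy]
      simp only [if_pos, List.length_cons, List.drop_succ_cons]
      have ht : (0 : Int) ≤ ((ys.takeWhile pvLow).length : Int) := Int.natCast_nonneg _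
      push_cast
      omega
    · have hy' : ¬ ('a' ≤ y ∧ y ≤ 'z') := by
        intro hcon; rw [show pvLow y = true by simp [pvLow, hcon]] at hy; exact hy rfl
      rw [List.takeWhile_cons, if_neg (by simpa [pvLow] using hy')]
      simp only [pvG]
      rw [if_pos hx', if_neg hy']
      simp [pvG, hy']

theorem pvLoop_char (chars : List Char) (best : Int) (i : Nat) (hb : 0 ≤ best) :
    pvLoop chars best i = max best (pvG 0 (chars.drop i)) := by
  by_cases h : i < chars.length
  · by_cases hl : 'a' ≤ chars[i] ∧ chars[i] ≤ 'z'
    · have hlow : pvLow chars[i] = true := by simp [pvLow, hl]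
      rw [pvLoop, dif_pos h, dif_pos hl]
      have hj := pvInnerJ_char chars i
      rw [List.drop_eq_getElem_cons h, List.takeWhile_cons, hlow] at hj
      simp only [if_pos, List.length_cons] at hj
      set t := ((chars.drop (i + 1)).takeWhile pvLow).length with ht
      have hge : i ≤ pvInnerJ chars i := pvInnerJ_ge chars i
      rw [pvLoop_char chars _ (pvInnerJ chars i) (by omega)]
      rw [List.drop_eq_getElem_cons h]
      rw [pvG_run (chars.drop (i + 1)) chars[i] 0 le_rfl hlow, ← ht]
      have hdrop : chars.drop (pvInnerJ chars i) = (chars.drop (i + 1)).drop t := by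
        rw [hj, List.drop_drop]
        congr 1
        omega
      rw [hdrop]
      have hji : ((pvInnerJ chars i : Int) - (i : Int)) = (t : Int) + 1 := by
        rw [hj]; push_cast; ring
      rw [hji]
      have ht0 : (0 : Int) ≤ (t : Int) := Int.natCast_nonneg t
      omega
    · rw [pvLoop, dif_pos h, dif_neg hl]
      rw [pvLoop_char chars best (i + 1) hb]
      rw [List.drop_eq_getElem_cons h]
      simp only [pvG]
      rw [if_neg hl]
  · rw [pvLoop, dif_neg h, List.drop_eq_nil_of_le (by omega)]
    simp only [pvG]
    omega
termination_by chars.length - i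
decreasing_by
  · have h1 := pvInnerJ_gt chars i h hl
    have h2 := pvInnerJ_le chars i (Nat.le_of_lt h)
    omega
  · omega

-- ===== VERDICT (by name: the statement is the Claim_ definition above) =====
theorem LongMin_spec : Claim_equal_LongMin := by
  intro password _
  unfold Spec_LongMin LongMin LongMin_alt
  rw [pv_foldA password.toList 0 0 le_rfl le_rfl]
  rw [pvLoop_char password.toList 0 0 le_rfl]
  simp
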